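-- pv_equiv track=rewrite | github.com/SeungWook0502/Algorithm | JuHo/1_py/recursive_py/2447.py | printStars
-- ===== SOURCE A (Python) =====
-- def printStars(n,arr):
--     pre_arr = []
--     if n<3:
--         return arr
--     else:
--         for i in arr:
--             pre_arr.append(i*3)
--         for j in arr:
--             pre_arr.append(j+' '*len(arr)+j)
--         for k in arr:
--             pre_arr.append(k*3)
--         return printStars(n//3,pre_arr)
-- ===== SOURCE B (Python) =====
-- def printStars(n, arr):
--     while n >= 3:
--         gap = ' ' * len(arr)
--         arr = [r * 3 for r in arr] + [r + gap + r for r in arr] + [r * 3 for r in arr]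
--         n //= 3
--     return arr
-- ===== Notes on version B (the rewrite author's own statement) =====
-- stated objective: idiomatic
-- what changed: The tail recursion with three explicit append loops into a shared pre_arr is rewritten as an iterative while-loop that rebinds arr to the concatenation of three list comprehensions each step.
import Mathlib
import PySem

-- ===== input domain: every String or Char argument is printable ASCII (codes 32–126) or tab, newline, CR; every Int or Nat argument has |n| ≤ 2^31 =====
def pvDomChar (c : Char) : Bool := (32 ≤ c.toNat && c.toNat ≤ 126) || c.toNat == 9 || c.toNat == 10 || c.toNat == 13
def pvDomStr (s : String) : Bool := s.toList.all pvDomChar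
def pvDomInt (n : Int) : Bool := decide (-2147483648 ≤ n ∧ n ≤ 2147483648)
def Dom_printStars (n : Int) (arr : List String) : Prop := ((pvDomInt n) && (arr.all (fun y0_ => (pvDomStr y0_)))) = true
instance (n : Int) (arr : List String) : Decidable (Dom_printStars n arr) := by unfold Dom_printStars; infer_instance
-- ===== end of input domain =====

-- B rewrites A's tail recursion as an iterative while-loop building each level from list comprehensions (same values, same cost; objective: idiomatic).

-- termination helper, cited by both ports
theorem pvFloordiv3_lt (n : Int) (h : ¬ n < 3) : (PySem.Int.floordiv n 3).toNat < n.toNat := by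
  have h3 : (0:Int) < 3 := by norm_num
  have hlt : PySem.Int.floordiv n 3 < n := by
    rw [PySem.Int.floordiv_lt_iff_lt_mul (hb := h3)]; omega
  omega

-- ===== PORT A =====
def printStars (n : Int) (arr : List String) : List String :=
  if h : n < 3 then arr
  else
    -- pre_arr built by three append loops, in order
    let p1 := arr.foldl (fun acc i => acc ++ [i ++ i ++ i]) []
    let p2 := arr.foldl (fun acc j => acc ++ [j ++ String.ofList (List.replicate arr.length ' ') ++ j]) p1
    let p3 := arr.foldl (fun acc k => acc ++ [k ++ k ++ k]) p2
    printStars (PySem.Int.floordiv n 3) p3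
termination_by n.toNat
decreasing_by exact pvFloordiv3_lt n h

-- ===== PORT B =====
-- the while-loop of Source B: each iteration rebinds arr to three concatenated comprehensions and floordivides n
def printStars_alt (n : Int) (arr : List String) : List String :=
  if h : 3 ≤ n then
    let gap := String.ofList (List.replicate arr.length ' ')
    printStars_alt (PySem.Int.floordiv n 3)
      (arr.map (fun r => r ++ r ++ r) ++ arr.map (fun r => r ++ gap ++ r) ++ arr.map (fun r => r ++ r ++ r))
  else arr
termination_by n.toNat
decreasing_by exact pvFloordiv3_lt n (by omega)

-- ===== PRECONDITION & SPEC =====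
def Spec_printStars (n : Int) (arr : List String) (out : List String) : Prop := out = printStars_alt n arr
instance (n : Int) (arr : List String) (out : List String) : Decidable (Spec_printStars n arr out) := by unfold Spec_printStars; infer_instance

-- ===== CLAIM (what is proved, stated in full; the proofs are below) =====
def Claim_equal_printStars : Prop := ∀ (n : Int) (arr : List String), Dom_printStars n arr → Spec_printStars n arr (printStars n arr)

-- ===== LEMMAS AND PROOFS =====

theorem pvFoldlApp {α β : Type} (f : α → β) (l : List α) :
    ∀ init : List β, l.foldl (fun acc x => acc ++ [f x]) init = init ++ l.map f := by
  induction l with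
  | nil => intro init; simp
  | cons x xs ih => intro init; simp [List.foldl, ih]

theorem pvEq (n : Int) (arr : List String) : printStars n arr = printStars_alt n arr := by
  induction hk : n.toNat using Nat.strong_induction_on generalizing n arr with
  | _ k ih =>
    rw [printStars, printStars_alt]
    by_cases h : n < 3
    · simp [h, show ¬ (3 ≤ n) by omega]
    · simp only [h, dif_neg, not_false_iff, show 3 ≤ n by omega, dif_pos]
      rw [pvFoldlApp, pvFoldlApp, pvFoldlApp]
      simp only [List.nil_append, List.append_assoc]
      exact ih _ (hk ▸ pvFloordiv3_lt n h) _ _ rfl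

-- ===== VERDICT (by name: the statement is the Claim_ definition above) =====
theorem printStars_spec : Claim_equal_printStars := by
  intro n arr _
  unfold Spec_printStars
  exact pvEq n arr
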